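-- pv_equiv track=rewrite | github.com/knotsanimation/knots-hub | tests/scripts/knotshub_tester.py | get_hub_calls
-- ===== SOURCE A (Python) =====
-- def get_hub_calls(argv: list[str]) -> list[list[str]]:
--     """
--     Return the different block of successive hub command to call.
--
--     Blocks are pipe (``|``) separated arguments.
--     """
--     blocks = [[]]
--     index = 0
--     for arg in argv:
--         if "|" in arg:
--             index += 1
--             blocks.append([])
--             continue
--         blocks[index].append(arg)
--
--     return blocks
-- ===== SOURCE B (Python) =====
-- def get_hub_calls(argv: list[str]) -> list[list[str]]:
--     """
--     Return the different block of successive hub command to call.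
--
--     Blocks are pipe (``|``) separated arguments.
--     """
--     for i, arg in enumerate(argv):
--         if "|" in arg:
--             return [argv[:i]] + get_hub_calls(argv[i + 1:])
--     return [argv]
-- ===== Notes on version B (the rewrite author's own statement) =====
-- stated objective: alternative
-- what changed: B splits recursively at the first pipe-argument and returns whole slices of argv, instead of A's single loop that appends element-by-element into the current block of a growing blocks list.
import Mathlib
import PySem

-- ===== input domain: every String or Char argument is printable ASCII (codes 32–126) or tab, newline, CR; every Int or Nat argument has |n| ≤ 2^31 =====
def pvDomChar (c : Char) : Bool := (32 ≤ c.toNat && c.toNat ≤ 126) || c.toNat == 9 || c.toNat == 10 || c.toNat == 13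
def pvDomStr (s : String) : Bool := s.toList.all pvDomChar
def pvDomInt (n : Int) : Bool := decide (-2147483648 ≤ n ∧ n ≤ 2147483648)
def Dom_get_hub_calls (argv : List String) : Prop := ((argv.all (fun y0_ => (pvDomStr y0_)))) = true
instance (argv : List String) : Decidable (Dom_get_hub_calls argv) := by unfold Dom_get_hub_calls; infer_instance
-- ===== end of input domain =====

-- B splits recursively at the first pipe-argument and returns whole slices of argv,
-- instead of A's loop appending element-by-element into the current block (alternative decomposition).


-- ===== PORT A =====
-- loop body of A: on a pipe-argument start a fresh block, otherwise append arg to blocks[index]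
def getHubCallsStepA (s : List (List String) × Nat) (arg : String) : List (List String) × Nat :=
  if PySem.Str.isIn "|" arg then (s.1 ++ [[]], s.2 + 1)
  else (s.1.modify s.2 (fun b => b ++ [arg]), s.2)

def get_hub_calls (argv : List String) : List (List String) :=
  (argv.foldl getHubCallsStepA ([[]], 0)).1

-- ===== PORT B =====
-- B: find the first pipe-argument; split argv there and recurse on the remainder
def get_hub_calls_alt (argv : List String) : List (List String) :=
  match h : argv.findIdx? (fun a => PySem.Str.isIn "|" a) with
  | some i =>
      PySem.List.slice argv none (some (i : Int)) ::
        get_hub_calls_alt (PySem.List.slice argv (some ((i : Int) + 1)) none)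
  | none => [argv]
termination_by argv.length
decreasing_by
  have hi : i < argv.length := by
    have := List.findIdx?_eq_some_iff_findIdx_eq.mp h
    omega
  have : PySem.List.slice argv (some ((i : Int) + 1)) none = argv.drop (i + 1) := by
    have : ((i : Int) + 1) = ((i + 1 : Nat) : Int) := by push_cast; ring
    rw [this, PySem.List.slice_from_natCast]
  simp [this, List.length_drop]
  omega

-- ===== PRECONDITION & SPEC =====
def Spec_get_hub_calls (argv : List String) (out : List (List String)) : Prop := out = get_hub_calls_alt argv
instance (argv : List String) (out : List (List String)) : Decidable (Spec_get_hub_calls argv out) := by unfold Spec_get_hub_calls; infer_instance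

-- ===== CLAIM (what is proved, stated in full; the proofs are below) =====
def Claim_equal_get_hub_calls : Prop := ∀ (argv : List String), Dom_get_hub_calls argv → Spec_get_hub_calls argv (get_hub_calls argv)

-- ===== LEMMAS AND PROOFS =====

-- unfold B's port when the first pipe-argument is at index i / when there is none
theorem alt_some {l : List String} {i : Nat}
    (h : l.findIdx? (fun a => PySem.Str.isIn "|" a) = some i) :
    get_hub_calls_alt l =
      PySem.List.slice l none (some (i : Int)) ::
        get_hub_calls_alt (PySem.List.slice l (some ((i : Int) + 1)) none) := by
  rw [get_hub_calls_alt]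
  split <;> simp_all

theorem alt_none {l : List String}
    (h : l.findIdx? (fun a => PySem.Str.isIn "|" a) = none) :
    get_hub_calls_alt l = [l] := by
  rw [get_hub_calls_alt]
  split
  · rename_i j hj
    rw [h] at hj
    cases hj
  · rfl

theorem alt_nil : get_hub_calls_alt [] = [[]] := alt_none rfl

theorem alt_cons (a : String) (l : List String) :
    get_hub_calls_alt (a :: l) =
      if PySem.Str.isIn "|" a then [] :: get_hub_calls_alt l
      else
        match get_hub_calls_alt l with
        | b :: bs => (a :: b) :: bs
        | [] => [[a]] := by
  by_cases hp : PySem.Str.isIn "|" a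
  · have h0 : (a :: l).findIdx? (fun a => PySem.Str.isIn "|" a) = some 0 := by
      rw [List.findIdx?_cons, if_pos hp]
    rw [alt_some h0, if_pos hp]
    have h1 : ((0 : Nat) : Int) + 1 = (1 : Int) := by norm_num
    rw [h1, PySem.List.slice_from_one]
    have h2 : PySem.List.slice (a :: l) none (some ((0 : Nat) : Int)) = [] := by
      rw [PySem.List.slice_to_natCast]; simp
    rw [h2]
    rfl
  · cases hf : l.findIdx? (fun a => PySem.Str.isIn "|" a) with
    | some j =>
      have h0 : (a :: l).findIdx? (fun a => PySem.Str.isIn "|" a) = some (j + 1) := by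
        rw [List.findIdx?_cons, if_neg hp, hf]
        rfl
      rw [alt_some h0, if_neg hp, alt_some hf]
      have e1 : PySem.List.slice (a :: l) none (some ((j + 1 : Nat) : Int)) =
          a :: PySem.List.slice l none (some (j : Int)) := by
        rw [PySem.List.slice_to_natCast, PySem.List.slice_to_natCast]
        simp [List.take_succ_cons]
      have e2 : PySem.List.slice (a :: l) (some (((j + 1 : Nat) : Int) + 1)) none =
          PySem.List.slice l (some ((j : Int) + 1)) none := by
        have c1 : (((j + 1 : Nat) : Int) + 1) = ((j + 2 : Nat) : Int) := by push_cast; ring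
        have c2 : ((j : Int) + 1) = ((j + 1 : Nat) : Int) := by push_cast; ring
        rw [c1, c2, PySem.List.slice_from_natCast, PySem.List.slice_from_natCast]
        rfl
      rw [e1, e2]
    | none =>
      have h0 : (a :: l).findIdx? (fun a => PySem.Str.isIn "|" a) = none := by
        rw [List.findIdx?_cons, if_neg hp, hf]
        rfl
      rw [alt_none h0, if_neg hp, alt_none hf]

theorem alt_ne_nil (l : List String) : get_hub_calls_alt l ≠ [] := by
  cases hf : l.findIdx? (fun a => PySem.Str.isIn "|" a) with
  | some j => rw [alt_some hf]; simp
  | none => rw [alt_none hf]; simp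

theorem modify_append_last (done : List (List String)) (cur : List String)
    (f : List String → List String) :
    (done ++ [cur]).modify done.length f = done ++ [f cur] := by
  induction done with
  | nil => simp [List.modify]
  | cons d ds ih => simp [ih]

theorem foldl_stepA (l : List String) :
    ∀ (done : List (List String)) (cur : List String),
      (l.foldl getHubCallsStepA (done ++ [cur], done.length)).1 =
        done ++ (match get_hub_calls_alt l with
                 | b :: bs => (cur ++ b) :: bs
                 | [] => [cur]) := by
  induction l with
  | nil => intro done cur; simp [alt_nil]
  | cons a l ih =>
    intro done cur
    rw [alt_cons]
    by_cases hp : PySem.Str.isIn "|" a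
    · simp only [List.foldl_cons, getHubCallsStepA, hp, if_pos]
      have hlen : (done ++ [cur]).length = done.length + 1 := by simp
      have := ih (done ++ [cur]) []
      simp only [List.append_assoc] at this ⊢
      rw [hlen] at *
      rw [this]
      cases hb : get_hub_calls_alt l with
      | nil => exact absurd hb (alt_ne_nil l)
      | cons b bs => simp
    · simp only [List.foldl_cons, getHubCallsStepA, hp, Bool.false_eq_true, if_neg,
        not_false_iff]
      rw [modify_append_last]
      have := ih done (cur ++ [a])
      rw [this]
      cases hb : get_hub_calls_alt l with
      | nil => exact absurd hb (alt_ne_nil l)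
      | cons b bs => simp

-- ===== VERDICT (by name: the statement is the Claim_ definition above) =====
theorem get_hub_calls_spec : Claim_equal_get_hub_calls := by
  intro argv _
  unfold Spec_get_hub_calls get_hub_calls
  have h := foldl_stepA argv [] []
  simp at h
  rw [h]
  cases hb : get_hub_calls_alt argv with
  | nil => exact absurd hb (alt_ne_nil argv)
  | cons b bs => simp
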